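-- pv_equiv track=rewrite | github.com/banana-galaxy/challenges | challenge17(backOnTime)/solutions/liron.py | solution
-- ===== SOURCE A (Python) =====
-- def solution(path):
--     if len(path)>10 or len(path)%2 != 0:
--         return False
--     south = len([x for x in path if x == 's'])
--     north = len([x for x in path if x == 'n'])
--     east = len([x for x in path if x == 'e'])
--     west = len([x for x in path if x == 'w'])
--     return south == north and east == west
-- ===== SOURCE B (Python) =====
-- def solution(path):
--     if len(path) > 10 or len(path) % 2 != 0:
--         return False
--     opp = {'n': 's', 's': 'n', 'e': 'w', 'w': 'e'}
--     return sorted(path) == sorted(opp.get(c, c) for c in path)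
-- ===== Notes on version B (the rewrite author's own statement) =====
-- stated objective: alternative
-- what changed: Instead of counting characters, B checks that the multiset of characters is invariant under the opposite-direction involution (n<->s, e<->w) by comparing sorted(path) with the sorted swapped path.
import Mathlib
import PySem

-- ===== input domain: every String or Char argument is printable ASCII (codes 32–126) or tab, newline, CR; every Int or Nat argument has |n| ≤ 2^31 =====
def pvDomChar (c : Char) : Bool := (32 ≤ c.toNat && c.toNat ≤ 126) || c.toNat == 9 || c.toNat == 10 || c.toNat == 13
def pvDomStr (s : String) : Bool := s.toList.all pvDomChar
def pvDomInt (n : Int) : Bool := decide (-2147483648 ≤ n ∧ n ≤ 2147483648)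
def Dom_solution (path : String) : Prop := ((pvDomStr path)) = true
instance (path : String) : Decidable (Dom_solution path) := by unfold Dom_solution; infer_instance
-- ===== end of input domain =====

-- B drops the counting entirely: balanced iff the multiset of characters is fixed by the
-- opposite-direction swap (n<->s, e<->w), checked by comparing two sorted lists. No speed claim.

-- ===== PORT A =====
def solution (path : String) : Bool :=
  if PySem.Str.len path > 10 ∨ PySem.Int.mod (PySem.Str.len path) 2 ≠ 0 then
    false
  else
    let south := (path.toList.filter (fun x => x == 's')).length
    let north := (path.toList.filter (fun x => x == 'n')).length
    let east := (path.toList.filter (fun x => x == 'e')).length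
    let west := (path.toList.filter (fun x => x == 'w')).length
    south == north && east == west

-- ===== PORT B =====
def solution_alt (path : String) : Bool :=
  if PySem.Str.len path > 10 ∨ PySem.Int.mod (PySem.Str.len path) 2 ≠ 0 then
    false
  else
    let opp : PySem.Dict Char Char := PySem.Dict.ofList [('n','s'), ('s','n'), ('e','w'), ('w','e')]
    PySem.List.sorted path.toList (fun x => x)
      == PySem.List.sorted (path.toList.map (fun c => PySem.Dict.getD opp c c)) (fun x => x)

-- ===== PRECONDITION & SPEC =====
def Spec_solution (path : String) (out : Bool) : Prop := out = solution_alt path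
instance (path : String) (out : Bool) : Decidable (Spec_solution path out) := by unfold Spec_solution; infer_instance

-- ===== CLAIM (what is proved, stated in full; the proofs are below) =====
def Claim_equal_solution : Prop := ∀ (path : String), Dom_solution path → Spec_solution path (solution path)

-- ===== LEMMAS AND PROOFS =====

-- the swap function B maps over the path
def pvOpp (c : Char) : Char :=
  PySem.Dict.getD (PySem.Dict.ofList [('n','s'), ('s','n'), ('e','w'), ('w','e')]) c c

lemma pvOpp_eval (c : Char) :
    pvOpp c = if c = 'n' then 's' else if c = 's' then 'n'
      else if c = 'e' then 'w' else if c = 'w' then 'e' else c := by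
  by_cases h1 : c = 'n'
  · subst h1; decide
  by_cases h2 : c = 's'
  · subst h2; decide
  by_cases h3 : c = 'e'
  · subst h3; decide
  by_cases h4 : c = 'w'
  · subst h4; decide
  simp only [h1, h2, h3, h4, if_false]
  unfold pvOpp
  have hd : (PySem.Dict.ofList [('n','s'), ('s','n'), ('e','w'), ('w','e')] : PySem.Dict Char Char).items
      = [('n','s'), ('s','n'), ('e','w'), ('w','e')] := by rfl
  simp only [PySem.Dict.getD, PySem.Dict.get?, hd, List.find?]
  rw [show ('n' == c) = false by simp [Ne.symm h1], show ('s' == c) = false by simp [Ne.symm h2],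
      show ('e' == c) = false by simp [Ne.symm h3], show ('w' == c) = false by simp [Ne.symm h4]]
  rfl

lemma pvOpp_invol (c : Char) : pvOpp (pvOpp c) = c := by
  simp only [pvOpp_eval]
  split_ifs <;> simp_all

lemma pv_count_map (x : Char) (l : List Char) :
    List.count x (l.map pvOpp) = List.count (pvOpp x) l := by
  induction l with
  | nil => simp
  | cons c t ih =>
    simp only [List.map_cons, List.count_cons, ih]
    have : (pvOpp c = x) ↔ (c = pvOpp x) := by
      constructor
      · intro h; rw [← h, pvOpp_invol]
      · intro h; rw [h, pvOpp_invol]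
    by_cases h : c = pvOpp x
    · simp [h, pvOpp_invol]
    · have : pvOpp c ≠ x := fun hc => h (this.mp hc)
      simp [h, this]

lemma pv_perm_iff (l : List Char) :
    l.Perm (l.map pvOpp) ↔
      (List.count 'n' l = List.count 's' l ∧ List.count 'e' l = List.count 'w' l) := by
  rw [List.perm_iff_count]
  constructor
  · intro h
    constructor
    · have := h 'n'; rwa [pv_count_map, show pvOpp 'n' = 's' from rfl] at this
    · have := h 'e'; rwa [pv_count_map, show pvOpp 'e' = 'w' from rfl] at this
  · rintro ⟨hns, hew⟩ x
    rw [pv_count_map]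
    by_cases hn : x = 'n'
    · simp [hn, pvOpp_eval, hns]
    by_cases hs : x = 's'
    · simp [hs, pvOpp_eval, hns]
    by_cases he : x = 'e'
    · simp [he, pvOpp_eval, hew]
    by_cases hw : x = 'w'
    · simp [hw, pvOpp_eval, hew]
    · simp [pvOpp_eval, hn, hs, he, hw]

-- ===== VERDICT (by name: the statement is the Claim_ definition above) =====
theorem solution_spec : Claim_equal_solution := by
  intro path _
  unfold Spec_solution solution solution_alt
  split
  · rfl
  · show _ = (_ == PySem.List.sorted ((path.toList).map pvOpp) _)
    rw [Bool.eq_iff_iff]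
    simp only [beq_iff_eq, Bool.and_eq_true]
    rw [PySem.List.sorted_id_eq_sorted_id_iff_perm, pv_perm_iff]
    simp only [← List.count_eq_length_filter]
    constructor
    · rintro ⟨h1, h2⟩; exact ⟨h1.symm, h2⟩
    · rintro ⟨h1, h2⟩; exact ⟨h1.symm, h2⟩
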